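-- pv_equiv track=rewrite | github.com/TheSmoun/AdventOfCodeOld | 2018/8/puzzle1.py | solve
-- ===== SOURCE A (Python) =====
-- def solve(numbers):
--     children_size, metadata_size = numbers[:2]
--     del numbers[:2]
--
--     metadata_sum = 0
--     for _ in range(children_size):
--         s, numbers = solve(numbers)
--         metadata_sum += s
--
--     metadata_sum += sum(numbers[:metadata_size])
--     return (metadata_sum, numbers[metadata_size:])
-- ===== SOURCE B (Python) =====
-- # Iterative depth-first traversal with an explicit stack instead of recursion.
-- # (A truncates its argument in place; B leaves it intact -- the equivalence is
-- # about the return value only.)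
-- def solve(numbers):
--     rest = numbers
--     c, m = rest[:2]
--     rest = rest[2:]
--     stack = [[c, m, 0]]            # frames: [children left, metadata size, acc]
--     while stack:
--         top = stack[-1]
--         if top[0] > 0:             # descend into the next child
--             top[0] -= 1
--             c, m = rest[:2]
--             rest = rest[2:]
--             stack.append([c, m, 0])
--         else:                      # node done: take its metadata, fold into parent
--             _, m, acc = stack.pop()
--             acc += sum(rest[:m])
--             rest = rest[m:]
--             if stack:
--                 stack[-1][2] += acc
--             else:
--                 return acc, rest
-- ===== Notes on version B (the rewrite author's own statement) =====
-- stated objective: alternative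
-- what changed: A descends the tree by recursion, each call unpacking and re-threading the shrinking list; B traverses it iteratively in a single while loop over an explicit stack of [children-left, metadata-size, accumulator] frames, folding each finished node's sum into its parent frame.
import Mathlib
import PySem

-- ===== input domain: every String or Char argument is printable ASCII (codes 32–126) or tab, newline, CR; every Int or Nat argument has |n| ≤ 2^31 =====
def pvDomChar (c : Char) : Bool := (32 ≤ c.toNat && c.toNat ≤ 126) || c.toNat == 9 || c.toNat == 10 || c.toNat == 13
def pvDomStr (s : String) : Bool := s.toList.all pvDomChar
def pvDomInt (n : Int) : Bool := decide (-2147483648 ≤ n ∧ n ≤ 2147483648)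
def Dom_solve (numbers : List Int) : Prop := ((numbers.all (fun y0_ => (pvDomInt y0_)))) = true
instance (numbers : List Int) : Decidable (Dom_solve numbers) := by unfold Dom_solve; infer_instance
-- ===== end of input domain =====

-- B replaces A's recursive descent by an iterative explicit-stack traversal of the
-- same list (objective: alternative). A mutates its argument in place
-- (del numbers[:2]); B does not; the equivalence proved here is about the RETURN
-- value only.


-- ===== PORT A =====
-- Fuel = one unit per node call; `solve` supplies length+1, enough for every
-- well-formed input (each nested call starts at least 2 elements further in).
-- generic counted loop: run `step` k times from state st, summing the Int outputs
-- (the shape of A's 'for _ in range(k): s, st = step(st); total += s')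
def kidsAux {σ : Type} (step : σ → Int × σ) : Nat → Int → σ → Int × σ
  | 0, s, st => (s, st)
  | k + 1, s, st =>
    let q := step st
    kidsAux step k (s + q.1) q.2

def solveA : Nat → List Int → Int × List Int
  | 0, ns => (0, ns)
  | f + 1, ns =>
    match ns with
    | c :: m :: rest =>                      -- children_size, metadata_size = numbers[:2]; del numbers[:2]
      let p := kidsAux (fun cur => solveA f cur) c.toNat 0 rest
        -- for _ in range(children_size): s, numbers = solve(numbers); metadata_sum += s
      (p.1 + (PySem.List.slice p.2 none (some m)).sum,   -- metadata_sum += sum(numbers[:metadata_size])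
       PySem.List.slice p.2 (some m) none)               -- return (metadata_sum, numbers[metadata_size:])
    | _ => (0, ns)                           -- Python raises ValueError here (outside Pre_)

def solve (numbers : List Int) : Int × List Int :=
  solveA (numbers.length + 1) numbers

-- ===== PORT B =====
-- Source B's while loop, fuelled by one unit per iteration; 2*len+4 covers every run
-- (each frame costs one push and one pop, and a push consumes two elements).
def loopB : Nat → List Int → List (Int × Int × Int) → Option (Int × List Int)
  | 0, _, _ => none
  | _ + 1, _, [] => none                     -- 'while stack' exits: unreachable from solve_alt
  | f + 1, r, (c, mm, acc) :: st =>
    if 0 < c then                            -- if top[0] > 0: descend into the next child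
      match r with
      | c1 :: m1 :: r2 =>                    -- c, m = rest[:2]; rest = rest[2:]; push [c, m, 0]
        loopB f r2 ((c1, m1, 0) :: (c - 1, mm, acc) :: st)
      | _ => none                            -- Python raises ValueError here (outside Pre_)
    else                                     -- node done: pop, take metadata, fold into parent
      let acc2 := acc + (PySem.List.slice r none (some mm)).sum   -- acc += sum(rest[:m])
      let r2 := PySem.List.slice r (some mm) none                 -- rest = rest[m:]
      match st with
      | [] => some (acc2, r2)                -- return acc, rest
      | (c2, m2, a2) :: st2 => loopB f r2 ((c2, m2, a2 + acc2) :: st2)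

def solve_alt (numbers : List Int) : Int × List Int :=
  match numbers with
  | c :: mm :: rest =>                       -- c, m = rest[:2]; rest = rest[2:]; stack = [[c, m, 0]]
    (loopB (2 * numbers.length + 4) rest [(c, mm, 0)]).getD (0, numbers)
  | _ => (0, numbers)                        -- Python raises ValueError here (outside Pre_)

-- ===== PRECONDITION & SPEC =====
-- A raises (ValueError) exactly when some node's two-element header is missing from
-- the remaining list; Pre_ excludes exactly those inputs and nothing else.
-- Well-formedness of a recursive tree encoding is itself recursive, so Pre_ is a
-- recognizer: it returns only the unread suffix, computing neither program's output.
def chkAuxL (step : List Int → Option (List Int)) : Nat → List Int → Option (List Int)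
  | 0, r => some r
  | k + 1, r => (step r).bind (chkAuxL step k)

def chkNodeL : Nat → List Int → Option (List Int)
  | 0, _ => none
  | g + 1, c :: mm :: rest =>
    (chkAuxL (chkNodeL g) c.toNat rest).map fun rc => PySem.List.slice rc (some mm) none
  | _ + 1, _ => none

def Pre_solve (numbers : List Int) : Prop :=
  (chkNodeL (numbers.length + 1) numbers).isSome = true
instance (numbers : List Int) : Decidable (Pre_solve numbers) := by
  unfold Pre_solve; infer_instance

def pvWitness_solve : List Int := [2, 3, 0, 3, 10, 11, 12, 1, 1, 0, 1, 99, 2, 1, 1, 2]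

def Spec_solve (numbers : List Int) (out : Int × List Int) : Prop := out = solve_alt numbers
instance (numbers : List Int) (out : Int × List Int) : Decidable (Spec_solve numbers out) := by
  unfold Spec_solve; infer_instance

-- ===== CLAIM (what is proved, stated in full; the proofs are below) =====
def Claim_equal_solve : Prop :=
  ∀ (numbers : List Int), Dom_solve numbers → Pre_solve numbers → Spec_solve numbers (solve numbers)

-- ===== LEMMAS AND PROOFS =====

-- what the loop does right after popping a frame: hand the value to the parent, or return
def contB (fuel : Nat) (v : Int) (r' : List Int) (st : List (Int × Int × Int)) :
    Option (Int × List Int) :=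
  match st with
  | [] => some (v, r')
  | (c2, m2, a2) :: st2 => loopB fuel r' ((c2, m2, a2 + v) :: st2)

-- the node invariant: where the recognizer accepts a node, A's recursion and k+1
-- loop iterations of B both consume it, producing the same sum and the same suffix
def NodeInvL (g : Nat) : Prop :=
  ∀ c mm rest r', chkNodeL (g + 1) (c :: mm :: rest) = some r' →
    r'.length ≤ rest.length ∧
    (solveA (g + 1) (c :: mm :: rest)).2 = r' ∧
    ∃ k, k ≤ rest.length - r'.length ∧
      ∀ fuel acc st,
        loopB (fuel + (k + 1)) rest ((c, mm, acc) :: st) =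
          contB fuel (acc + (solveA (g + 1) (c :: mm :: rest)).1) r' st

theorem slice_from_len_le (xs : List Int) (m : Int) :
    (PySem.List.slice xs (some m) none).length ≤ xs.length := by
  by_cases hm : 0 ≤ m
  · rw [PySem.List.slice_from _ hm]; simp
  · have hk : 0 < (-m).toNat := by omega
    have hmk : m = -(((-m).toNat : Nat) : Int) := by omega
    rw [hmk, PySem.List.slice_from_neg_natCast _ _ hk]; simp

theorem chk_shape (g : Nat) (r r' : List Int) (h : chkNodeL g r = some r') :
    ∃ c mm rest, r = c :: mm :: rest := by
  cases g with
  | zero => simp [chkNodeL] at h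
  | succ g =>
    match r with
    | c :: mm :: rest => exact ⟨c, mm, rest, rfl⟩
    | [] => simp [chkNodeL] at h
    | [x] => simp [chkNodeL] at h

theorem loopB_descend (f : Nat) (c mm acc : Int) (hc : 0 < c) (c1 m1 : Int)
    (r2 : List Int) (st : List (Int × Int × Int)) :
    loopB (f + 1) (c1 :: m1 :: r2) ((c, mm, acc) :: st) =
      loopB f r2 ((c1, m1, 0) :: (c - 1, mm, acc) :: st) := by
  simp only [loopB, if_pos hc]

theorem loopB_pop (f : Nat) (c mm acc : Int) (hc : ¬ 0 < c) (r : List Int)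
    (st : List (Int × Int × Int)) :
    loopB (f + 1) r ((c, mm, acc) :: st) =
      contB f (acc + (PySem.List.slice r none (some mm)).sum)
        (PySem.List.slice r (some mm) none) st := by
  cases st with
  | nil => simp only [loopB, if_neg hc, contB]
  | cons p st2 =>
    obtain ⟨c2, m2, a2⟩ := p
    simp only [loopB, if_neg hc, contB]

theorem solveA_cons (f : Nat) (c m : Int) (rest : List Int) :
    solveA (f + 1) (c :: m :: rest) =
      ((kidsAux (fun cur => solveA f cur) c.toNat 0 rest).1 +
          (PySem.List.slice (kidsAux (fun cur => solveA f cur) c.toNat 0 rest).2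
            none (some m)).sum,
        PySem.List.slice (kidsAux (fun cur => solveA f cur) c.toNat 0 rest).2
          (some m) none) := rfl

theorem kidsAux_eval {σ : Type} (step : σ → Int × σ) :
    ∀ (k : Nat) (s : Int) (st : σ),
      kidsAux step k s st = (s + (kidsAux step k 0 st).1, (kidsAux step k 0 st).2) := by
  intro k
  induction k with
  | zero => intro s st; simp [kidsAux]
  | succ k ih =>
    intro s st
    simp only [kidsAux]
    rw [ih (s + (step st).1), ih (0 + (step st).1)]
    simp only [Prod.mk.injEq]
    exact ⟨by ring, by trivial⟩

theorem kids_sim (g : Nat) (hP : NodeInvL g) :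
    ∀ (j : Nat) (r0 rc : List Int), chkAuxL (chkNodeL (g + 1)) j r0 = some rc →
      rc.length ≤ r0.length ∧
      (∀ s, (kidsAux (fun cur => solveA (g + 1) cur) j s r0).2 = rc) ∧
      ∃ k, k ≤ r0.length - rc.length ∧
        ∀ (fuel : Nat) (c mm acc : Int) (st : List (Int × Int × Int)), c.toNat = j →
          loopB (fuel + k) r0 ((c, mm, acc) :: st) =
            loopB fuel rc
              ((c - (j : Int), mm, (kidsAux (fun cur => solveA (g + 1) cur) j acc r0).1) :: st) := by
  intro j
  induction j with
  | zero =>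
    intro r0 rc hc
    simp only [chkAuxL, Option.some.injEq] at hc
    subst hc
    refine ⟨le_rfl, fun s => by simp [kidsAux], 0, by omega, ?_⟩
    intro fuel c mm acc st _
    simp [kidsAux]
  | succ j ih =>
    intro r0 rc hc
    simp only [chkAuxL] at hc
    cases h1 : chkNodeL (g + 1) r0 with
    | none => rw [h1] at hc; simp at hc
    | some r1 =>
      rw [h1] at hc
      simp only [Option.bind_some] at hc
      obtain ⟨c1, m1, rest1, hr0⟩ := chk_shape _ _ _ h1
      subst hr0
      obtain ⟨hlen1, hA2, k1, hk1, hloop1⟩ := hP c1 m1 rest1 r1 h1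
      obtain ⟨hlenc, hKA, k2, hk2, hloop2⟩ := ih r1 rc hc
      refine ⟨by simp; omega, ?_, k1 + k2 + 2, by simp; omega, ?_⟩
      · intro s
        simp only [kidsAux]
        rw [hA2]
        exact hKA _
      · intro fuel c mm acc st hct
        have hc0 : 0 < c := by omega
        have hfe : fuel + (k1 + k2 + 2) = ((fuel + k2) + (k1 + 1)) + 1 := by omega
        rw [hfe, loopB_descend ((fuel + k2) + (k1 + 1)) c mm acc hc0,
            hloop1 (fuel + k2) 0 ((c - 1, mm, acc) :: st)]
        simp only [contB]
        have hct2 : (c - 1).toNat = j := by omega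
        rw [hloop2 fuel (c - 1) mm (acc + (0 + (solveA (g + 1) (c1 :: m1 :: rest1)).1)) st hct2]
        have hcj : c - 1 - (j : Int) = c - ((j : Nat) + 1 : Nat) := by push_cast; ring
        have hkk : (kidsAux (fun cur => solveA (g + 1) cur) (j + 1) acc
              (c1 :: m1 :: rest1)).1 =
            (kidsAux (fun cur => solveA (g + 1) cur) j
              (acc + (0 + (solveA (g + 1) (c1 :: m1 :: rest1)).1)) r1).1 := by
          simp only [kidsAux]
          rw [hA2]
          congr 1
          ring
        rw [hcj, hkk]

theorem node_inv : ∀ g : Nat, NodeInvL g := by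
  intro g
  induction g with
  | zero =>
    intro c mm rest r' hc
    simp only [chkNodeL] at hc
    rw [Option.map_eq_some_iff] at hc
    obtain ⟨rc, hkids, hr'⟩ := hc
    -- with inner fuel 0, only c.toNat = 0 children parse
    match hj : c.toNat, hkids with
    | 0, hkids =>
      simp only [chkAuxL, Option.some.injEq] at hkids
      subst hkids
      subst hr'
      refine ⟨slice_from_len_le _ _, ?_, 0, by omega, ?_⟩
      · rw [solveA_cons, hj]
        simp only [kidsAux]
      · intro fuel acc st
        have hcle : ¬ 0 < c := by omega
        rw [show fuel + (0 + 1) = fuel + 1 from rfl, loopB_pop fuel c mm acc hcle,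
            solveA_cons, hj]
        simp only [kidsAux]
        rw [zero_add]
    | j + 1, hkids =>
      simp only [chkAuxL, Option.bind] at hkids
      exact absurd hkids (by simp)
  | succ g ih =>
    intro c mm rest r' hc
    simp only [chkNodeL] at hc
    rw [Option.map_eq_some_iff] at hc
    obtain ⟨rc, hkids, hr'⟩ := hc
    obtain ⟨hlen, hKA, k, hk, hloop⟩ := kids_sim g ih c.toNat rest rc hkids
    have hr'len : r'.length ≤ rc.length := by rw [← hr']; exact slice_from_len_le _ _
    refine ⟨by omega, ?_, k, by omega, ?_⟩
    · rw [solveA_cons, hKA 0, hr']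
    · intro fuel acc st
      have hfe : fuel + (k + 1) = (fuel + 1) + k := by omega
      rw [hfe, hloop (fuel + 1) c mm acc st rfl]
      have hcle : ¬ 0 < c - (c.toNat : Int) := by omega
      rw [loopB_pop fuel _ _ _ hcle]
      have hsum : (kidsAux (fun cur => solveA (g + 1) cur) c.toNat acc rest).1 +
            (PySem.List.slice rc none (some mm)).sum =
          acc + (solveA (g + 1 + 1) (c :: mm :: rest)).1 := by
        rw [solveA_cons, hKA 0, kidsAux_eval _ _ acc]
        ring
      rw [hr', hsum]

-- ===== VERDICT (by name: the statement is the Claim_ definition above) =====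
theorem solve_spec : Claim_equal_solve := by
  intro ns _ hpre
  unfold Pre_solve at hpre
  rw [Option.isSome_iff_exists] at hpre
  obtain ⟨r', hchk⟩ := hpre
  obtain ⟨c, mm, rest, hns⟩ := chk_shape _ _ _ hchk
  subst hns
  have hfg : (c :: mm :: rest).length + 1 = (rest.length + 2) + 1 := by simp
  rw [hfg] at hchk
  obtain ⟨hlen, hA2, k, hk, hloop⟩ := node_inv (rest.length + 2) c mm rest r' hchk
  unfold Spec_solve solve solve_alt
  dsimp only
  have hfuel : 2 * (c :: mm :: rest).length + 4 = (2 * (c :: mm :: rest).length + 3 - k) + (k + 1) := by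
    simp; omega
  rw [hfuel, hloop (2 * (c :: mm :: rest).length + 3 - k) 0 []]
  simp only [contB, Option.getD_some]
  have h1 : solveA ((c :: mm :: rest).length + 1) (c :: mm :: rest) =
      solveA ((rest.length + 2) + 1) (c :: mm :: rest) := by rw [hfg]
  rw [h1, Prod.ext_iff]
  exact ⟨by simp, by simp [hA2]⟩
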